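-- pv_equiv track=rewrite | github.com/cr7coder/python-summer2025 | LTTH/Buoi8_ontap/bai2.py | PHANTICH
-- ===== SOURCE A (Python) =====
-- def PHANTICH(n):
--     ds = []
--     for a in range(1, n, 2):
--         for b in range(1, n - a, 2):
--             for c in range(1, n - a - b, 2):
--                 for d in range(1, n - a - b-c, 2):
--                     e = n - a - b - c-d
--                     if e >= 1 and e % 2 != 0:
--                         ds.append((a, b, c, d,e))
--     return ds
-- ===== SOURCE B (Python) =====
-- def PHANTICH(n):
--     # Recursive decomposition (memoized): ordered k-tuples of odd positives summing to rem.
--     memo = {}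
--     def rec(k, rem):
--         if k == 1:
--             return [(rem,)] if rem >= 1 and rem % 2 != 0 else []
--         key = (k, rem)
--         if key not in memo:
--             memo[key] = [(first,) + t
--                          for first in range(1, rem, 2)
--                          for t in rec(k - 1, rem - first)]
--         return memo[key]
--     return rec(5, n)
-- ===== Notes on version B (the rewrite author's own statement) =====
-- stated objective: alternative
-- what changed: Replaces the four hard-coded nested loops with a recursive helper rec(k, rem) that enumerates ordered k-tuples of odd positives summing to rem, called as rec(5, n).
import Mathlib
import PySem

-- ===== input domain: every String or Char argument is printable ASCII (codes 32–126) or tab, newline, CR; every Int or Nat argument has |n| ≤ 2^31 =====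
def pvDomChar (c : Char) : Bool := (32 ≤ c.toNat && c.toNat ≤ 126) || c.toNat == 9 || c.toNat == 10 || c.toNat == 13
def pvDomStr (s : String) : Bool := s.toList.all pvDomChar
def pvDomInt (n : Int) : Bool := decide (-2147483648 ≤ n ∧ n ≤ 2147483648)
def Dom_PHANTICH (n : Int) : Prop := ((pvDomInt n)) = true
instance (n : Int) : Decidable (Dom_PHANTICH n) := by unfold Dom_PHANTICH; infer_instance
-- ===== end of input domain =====

-- B replaces A's four fixed nested loops by a recursion on the tuple length; same return value, no side effects.

-- ===== PORT A =====
def PHANTICH (n : Int) : List (List Int) :=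
  (PySem.List.pyRange 1 n 2).foldl (fun ds a =>
    (PySem.List.pyRange 1 (n - a) 2).foldl (fun ds b =>
      (PySem.List.pyRange 1 (n - a - b) 2).foldl (fun ds c =>
        (PySem.List.pyRange 1 (n - a - b - c) 2).foldl (fun ds d =>
          let e := n - a - b - c - d
          if e ≥ 1 ∧ PySem.Int.mod e 2 ≠ 0 then ds ++ [[a, b, c, d, e]] else ds) ds) ds) ds) []

-- ===== PORT B =====
def PHANTICH_rec : Nat → Int → List (List Int)
  | 0, _ => []
  | 1, rem => if rem ≥ 1 ∧ PySem.Int.mod rem 2 ≠ 0 then [[rem]] else []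
  | k + 2, rem =>
    (PySem.List.pyRange 1 rem 2).flatMap (fun first =>
      (PHANTICH_rec (k + 1) (rem - first)).map (fun t => first :: t))

def PHANTICH_alt (n : Int) : List (List Int) := PHANTICH_rec 5 n

-- ===== PRECONDITION & SPEC =====
def Spec_PHANTICH (n : Int) (out : List (List Int)) : Prop := out = PHANTICH_alt n
instance (n : Int) (out : List (List Int)) : Decidable (Spec_PHANTICH n out) := by unfold Spec_PHANTICH; infer_instance

-- ===== CLAIM (what is proved, stated in full; the proofs are below) =====
def Claim_equal_PHANTICH : Prop := ∀ (n : Int), Dom_PHANTICH n → Spec_PHANTICH n (PHANTICH n)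

-- ===== LEMMAS AND PROOFS =====

theorem flatMap_ite_singleton {α β : Type} (l : List α) (p : α → Prop) [DecidablePred p]
    (f : α → β) :
    l.flatMap (fun x => if p x then [f x] else []) = (l.filter (fun x => decide (p x))).map f := by
  induction l with
  | nil => rfl
  | cons x xs ih =>
    simp only [List.flatMap_cons, List.filter_cons, ih]
    by_cases h : p x <;> simp [h]

theorem PHANTICH_eq_flatMap (n : Int) :
    PHANTICH n =
      (PySem.List.pyRange 1 n 2).flatMap (fun a =>
        (PySem.List.pyRange 1 (n - a) 2).flatMap (fun b =>
          (PySem.List.pyRange 1 (n - a - b) 2).flatMap (fun c =>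
            (PySem.List.pyRange 1 (n - a - b - c) 2).flatMap (fun d =>
              if n - a - b - c - d ≥ 1 ∧ PySem.Int.mod (n - a - b - c - d) 2 ≠ 0
              then [[a, b, c, d, n - a - b - c - d]] else [])))) := by
  unfold PHANTICH
  simp only [PySem.List.foldl_append_ite, PySem.List.foldl_append_eq_flatMap,
    List.nil_append, flatMap_ite_singleton]

theorem PHANTICH_spec' (n : Int) : PHANTICH n = PHANTICH_alt n := by
  rw [PHANTICH_eq_flatMap]
  unfold PHANTICH_alt
  show _ = PHANTICH_rec 5 n
  simp only [PHANTICH_rec, List.map_flatMap]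
  refine List.flatMap_congr ?_; intro a _
  refine List.flatMap_congr ?_; intro b _
  refine List.flatMap_congr ?_; intro c _
  refine List.flatMap_congr ?_; intro d _
  split <;> simp

-- ===== VERDICT (by name: the statement is the Claim_ definition above) =====
theorem PHANTICH_spec : Claim_equal_PHANTICH := by
  intro n _
  exact PHANTICH_spec' n
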